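-- pv_equiv track=rewrite | github.com/achen632/ITRI-LungCancer | eval_CT_helper.py | get_last_slice
-- ===== SOURCE A (Python) =====
-- def compare_boxes(box1, box2):
--     thresh = 15
--     return (abs(box1[0]-box2[0]) < thresh and
--             abs(box1[1]-box2[1]) < thresh and
--             abs(box1[2]-box2[2]) < thresh and
--             abs(box1[3]-box2[3]) < thresh)
--
-- def check_slice_for_box(slice, ref):
--     for box in slice:
--         if compare_boxes(box, ref):
--             return True
--     return False
--
-- def last_slice_one_apart(index, boxes, ref):
--     if index < len(boxes)-1:
--         return check_slice_for_box(boxes[index+1], ref)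
--     return False
--
-- def get_last_slice(index, boxes, ref):
--     while index < len(boxes):
--         if check_slice_for_box(boxes[index], ref):
--             index += 1
--         elif last_slice_one_apart(index, boxes, ref):
--             index += 2
--         else:
--             break
--     return index-1
-- ===== SOURCE B (Python) =====
-- def compare_boxes(box1, box2):
--     thresh = 15
--     return (abs(box1[0]-box2[0]) < thresh and
--             abs(box1[1]-box2[1]) < thresh and
--             abs(box1[2]-box2[2]) < thresh and
--             abs(box1[3]-box2[3]) < thresh)
--
-- def check_slice_for_box(slice, ref):
--     for box in slice:
--         if compare_boxes(box, ref):
--             return True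
--     return False
--
-- def get_last_slice(index, boxes, ref):
--     n = len(boxes)
--     matched = [j for j in range(index, n) if check_slice_for_box(boxes[j], ref)]
--     prev = index - 1
--     for m in matched:
--         if m > prev + 2:
--             break
--         prev = m
--     return prev
-- ===== Notes on version B (the rewrite author's own statement) =====
-- stated objective: alternative
-- what changed: Replaces A's +1/+2 lookahead walk (with last_slice_one_apart) by staged passes: first list the matched slice indices in [index, n), then fold a chain over that list accepting each matched index within 2 of the previous one and returning the last accepted (starting from index-1).
-- outside the precondition, e.g. on get_last_slice(0, [[[0, 0]]], [99, 0, 0, 0]): A returns -1, B returns -1; on get_last_slice(-2, [[[0, 0, 0, 0]]], [0, 0, 0, 0]): A raises IndexError, B raises IndexError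
import Mathlib
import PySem

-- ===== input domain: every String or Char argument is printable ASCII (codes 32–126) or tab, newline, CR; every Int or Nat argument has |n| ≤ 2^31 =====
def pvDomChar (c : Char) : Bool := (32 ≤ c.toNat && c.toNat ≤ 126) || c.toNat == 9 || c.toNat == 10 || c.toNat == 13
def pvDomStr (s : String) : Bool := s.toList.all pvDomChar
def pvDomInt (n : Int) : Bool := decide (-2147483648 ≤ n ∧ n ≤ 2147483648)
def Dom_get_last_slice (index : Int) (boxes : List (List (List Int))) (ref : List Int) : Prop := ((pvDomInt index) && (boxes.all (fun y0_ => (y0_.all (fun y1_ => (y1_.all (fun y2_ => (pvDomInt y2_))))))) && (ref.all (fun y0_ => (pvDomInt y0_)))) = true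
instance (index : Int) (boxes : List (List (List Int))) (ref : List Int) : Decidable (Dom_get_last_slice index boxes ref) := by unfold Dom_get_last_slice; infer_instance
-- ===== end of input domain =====

-- ===== PORT A =====
-- B replaces the +1/+2 lookahead walk by two staged passes: first list the matched slice
-- indices in [index, n), then fold a gap-≤2 chain over that list (objective: alternative).
-- helpers shared by both ports (identical in Source A and Source B)
def pvCompareBoxes (box1 box2 : List Int) : Bool :=
  let g := fun (b : List Int) (i : Int) => PySem.List.pyGetD b i 0
  decide ((g box1 0 - g box2 0).natAbs < 15) && decide ((g box1 1 - g box2 1).natAbs < 15) &&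
  decide ((g box1 2 - g box2 2).natAbs < 15) && decide ((g box1 3 - g box2 3).natAbs < 15)

def pvCheckSlice (slice : List (List Int)) (ref : List Int) : Bool :=
  match slice with
  | [] => false
  | box :: rest => if pvCompareBoxes box ref then true else pvCheckSlice rest ref

def pvLastOneApart (index : Int) (boxes : List (List (List Int))) (ref : List Int) : Bool :=
  if index < (boxes.length : Int) - 1 then
    pvCheckSlice (PySem.List.pyGetD boxes (index + 1) []) ref
  else false

def get_last_slice (index : Int) (boxes : List (List (List Int))) (ref : List Int) : Int :=
  if index < (boxes.length : Int) then
    if pvCheckSlice (PySem.List.pyGetD boxes index []) ref then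
      get_last_slice (index + 1) boxes ref
    else if pvLastOneApart index boxes ref then
      get_last_slice (index + 2) boxes ref
    else index - 1
  else index - 1
termination_by ((boxes.length : Int) - index).toNat
decreasing_by all_goals omega

-- ===== PORT B =====
-- the `for m in matched: if m > prev+2: break; prev = m` loop of Source B
def pvChain (prev : Int) (ms : List Int) : Int :=
  match ms with
  | [] => prev
  | m :: rest => if m > prev + 2 then prev else pvChain m rest

def get_last_slice_alt (index : Int) (boxes : List (List (List Int))) (ref : List Int) : Int :=
  let n : Int := boxes.length
  let matched : List Int := (PySem.List.pyRange index n 1).filter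
    (fun j => pvCheckSlice (PySem.List.pyGetD boxes j []) ref)
  pvChain (index - 1) matched

-- ===== PRECONDITION & SPEC =====
-- Pre_ excludes the inputs where the Python raises IndexError (index below -len(boxes), or a
-- box / ref shorter than 4 that gets indexed); it is slightly narrower than the exact raise-free
-- set: when index >= len(boxes) nothing is inspected (first disjunct), otherwise we require every
-- box and ref to have length >= 4 even though A may return early (short-circuit `and`, or slices
-- past the stopping point) without indexing some short box.
def Pre_get_last_slice (index : Int) (boxes : List (List (List Int))) (ref : List Int) : Prop :=
  (boxes.length : Int) <= index ∨
  (-(boxes.length : Int) <= index ∧ 4 <= ref.length ∧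
    ∀ s ∈ boxes, ∀ b ∈ s, 4 <= b.length)
instance (index : Int) (boxes : List (List (List Int))) (ref : List Int) : Decidable (Pre_get_last_slice index boxes ref) := by unfold Pre_get_last_slice; infer_instance

def pvWitness_get_last_slice : Int × List (List (List Int)) × List Int :=
  (0, [[[0, 0, 0, 0]], [[50, 0, 0, 0]]], [1, 2, 3, 4])

def Spec_get_last_slice (index : Int) (boxes : List (List (List Int))) (ref : List Int) (out : Int) : Prop := out = get_last_slice_alt index boxes ref
instance (index : Int) (boxes : List (List (List Int))) (ref : List Int) (out : Int) : Decidable (Spec_get_last_slice index boxes ref out) := by unfold Spec_get_last_slice; infer_instance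

-- ===== CLAIM (what is proved, stated in full; the proofs are below) =====
def Claim_equal_get_last_slice : Prop := ∀ (index : Int) (boxes : List (List (List Int))) (ref : List Int), Dom_get_last_slice index boxes ref → Pre_get_last_slice index boxes ref → Spec_get_last_slice index boxes ref (get_last_slice index boxes ref)

-- ===== LEMMAS AND PROOFS =====
-- the chain fold over the matched indices of [j, n) computes A's walk started at j
theorem pv_key (boxes : List (List (List Int))) (ref : List Int) (j : Int) :
    get_last_slice j boxes ref
      = pvChain (j - 1) ((PySem.List.pyRange j (boxes.length : Int) 1).filter
          (fun k => pvCheckSlice (PySem.List.pyGetD boxes k []) ref)) := by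
  rw [get_last_slice]
  by_cases hj : j < (boxes.length : Int)
  · rw [PySem.List.pyRange_one_cons hj, List.filter_cons]
    by_cases hm : pvCheckSlice (PySem.List.pyGetD boxes j []) ref
    · rw [if_pos hj, if_pos hm, if_pos (by simpa using hm), pvChain,
          if_neg (show ¬ (j > j - 1 + 2) by omega)]
      have := pv_key boxes ref (j + 1)
      simpa using this
    · rw [if_pos hj, if_neg hm]
      by_cases hl : pvLastOneApart j boxes ref
      · have hjn : j < (boxes.length : Int) - 1 := by
          by_contra h; simp [pvLastOneApart, h] at hl
        have hnext : pvCheckSlice (PySem.List.pyGetD boxes (j + 1) []) ref = true := by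
          simpa [pvLastOneApart, hjn] using hl
        rw [if_pos hl, if_neg (show ¬ (pvCheckSlice (PySem.List.pyGetD boxes j []) ref = true) from hm),
            PySem.List.pyRange_one_cons (show j + 1 < (boxes.length : Int) by omega),
            List.filter_cons, if_pos (by simpa using hnext), pvChain,
            if_neg (show ¬ (j + 1 > j - 1 + 2) by omega)]
        have := pv_key boxes ref (j + 2)
        have hjj : j + 1 + 1 = j + 2 := by ring
        have h2 : j + 2 - 1 = j + 1 := by ring
        rw [hjj]
        rw [h2] at this
        simpa using this
      · rw [if_neg hl, if_neg (show ¬ (pvCheckSlice (PySem.List.pyGetD boxes j []) ref = true) from hm)]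
        by_cases hlast : j + 1 < (boxes.length : Int)
        · have hnext : pvCheckSlice (PySem.List.pyGetD boxes (j + 1) []) ref = false := by
            by_contra h
            simp only [Bool.not_eq_false] at h
            exact hl (by simp [pvLastOneApart, show j < (boxes.length : Int) - 1 by omega, h])
          rw [PySem.List.pyRange_one_cons hlast, List.filter_cons, if_neg (by simp [hnext])]
          -- every remaining matched index is ≥ j+2 > (j-1)+2, so the chain stops at j-1
          cases hL : (PySem.List.pyRange (j + 1 + 1) (boxes.length : Int) 1).filter
              (fun k => pvCheckSlice (PySem.List.pyGetD boxes k []) ref) with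
          | nil => rfl
          | cons m rest =>
            have hmem : m ∈ (PySem.List.pyRange (j + 1 + 1) (boxes.length : Int) 1).filter
                (fun k => pvCheckSlice (PySem.List.pyGetD boxes k []) ref) := by
              rw [hL]; exact List.mem_cons_self
            have : j + 1 + 1 ≤ m := (PySem.List.mem_pyRange_one.mp (List.mem_filter.mp hmem).1).1
            rw [pvChain, if_pos (by omega)]
        · rw [PySem.List.pyRange_one_eq_nil (by omega), List.filter_nil]
          rfl
  · rw [if_neg hj, PySem.List.pyRange_one_eq_nil (by omega), List.filter_nil]
    rfl
termination_by ((boxes.length : Int) - j).toNat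
decreasing_by all_goals omega

-- ===== VERDICT (by name: the statement is the Claim_ definition above) =====
theorem get_last_slice_spec : Claim_equal_get_last_slice := by
  intro index boxes ref _ _
  unfold Spec_get_last_slice get_last_slice_alt
  exact pv_key boxes ref index
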